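-- pv_equiv track=rewrite | github.com/DevJoyKo/algorithms | problems_n_solutions/CDSIG_pop_cities.py | pop_nodes2
-- ===== SOURCE A (Python) =====
-- def pop_nodes2(graph, conquer_cities, days, node_iter):
--     days += 1
--     new_del_list = [*conquer_cities]
--     check_flag = False
--
--     for node in graph.keys():
--         if node in conquer_cities: continue
--         adjacents = [nd for nd in graph[node] if nd not in conquer_cities]
--
--         if len(adjacents) <= 1 or not graph[node]:
--             check_flag = True
--             node_iter[node] = days
--             new_del_list += [node]
--
--     if check_flag:
--         pop_nodes2(graph, new_del_list, days, node_iter)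
--
--     return conquer_cities, days, node_iter
-- ===== SOURCE B (Python) =====
-- def pop_nodes2(graph, conquer_cities, days, node_iter):
--     # Leaf-peeling with a removed-set, a degree table maintained by decrements,
--     # and a reverse index built once (A rescans adjacency vs a growing list each round).
--     removed = set(conquer_cities)
--     rev = {}
--     for w, adj in graph.items():
--         for v in adj:
--             rev.setdefault(v, []).append(w)
--     deg = {}
--     for w, adj in graph.items():
--         d = 0
--         for v in adj:
--             if v not in removed:
--                 d += 1
--         deg[w] = d
--     day = days
--     while True:
--         day += 1
--         layer = [w for w in graph if w not in removed and deg[w] <= 1]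
--         if not layer:
--             break
--         for w in layer:
--             node_iter[w] = day
--             removed.add(w)
--         for v in layer:
--             for w in rev.get(v, []):
--                 deg[w] -= 1
--     return conquer_cities, days + 1, node_iter
-- ===== Notes on version B (the rewrite author's own statement) =====
-- stated objective: faster
-- what changed: B replaces A's recursion that rescans every adjacency list against a growing conquered list each round with an iterative peel using a removed-set, a residual-degree table updated by decrements through a reverse index built once.
import Mathlib
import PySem

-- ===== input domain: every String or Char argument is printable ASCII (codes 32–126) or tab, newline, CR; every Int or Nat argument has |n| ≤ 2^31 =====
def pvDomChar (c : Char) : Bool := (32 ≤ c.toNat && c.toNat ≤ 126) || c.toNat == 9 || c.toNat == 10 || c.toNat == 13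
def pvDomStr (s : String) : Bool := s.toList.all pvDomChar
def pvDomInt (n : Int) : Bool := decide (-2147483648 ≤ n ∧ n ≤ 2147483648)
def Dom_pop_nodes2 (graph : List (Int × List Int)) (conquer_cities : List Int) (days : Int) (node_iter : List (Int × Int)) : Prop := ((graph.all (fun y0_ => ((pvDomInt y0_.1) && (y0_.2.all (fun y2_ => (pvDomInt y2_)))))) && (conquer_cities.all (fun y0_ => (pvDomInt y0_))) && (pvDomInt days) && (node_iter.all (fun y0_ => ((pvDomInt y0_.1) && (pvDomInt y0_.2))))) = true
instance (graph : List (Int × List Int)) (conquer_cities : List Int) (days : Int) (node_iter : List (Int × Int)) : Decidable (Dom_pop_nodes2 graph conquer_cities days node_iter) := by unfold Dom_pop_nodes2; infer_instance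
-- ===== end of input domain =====

-- B re-implements the leaf-peeling with a removed-set, a degree table maintained by decrements
-- through a reverse index built once, instead of A's per-round adjacency rescans against a growing
-- list (objective: faster). Both Pythons mutate node_iter in place identically; the equivalence
-- proved here is about the return value.

-- ===== PORT A =====
-- one recursion level's for-loop over graph.keys(); state = (new_del_list, check_flag, node_iter)
def popStep (g : PySem.Dict Int (List Int)) (conquer : List Int) (days : Int)
    (m : PySem.Dict Int Int) : List Int × Bool × PySem.Dict Int Int :=
  g.keys.foldl (fun st node =>
    if node ∈ conquer then st
    else
      let adjacents := (g.getD node []).filter (fun nd => decide (nd ∉ conquer))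
      if adjacents.length ≤ 1 ∨ g.getD node [] = [] then
        (st.1 ++ [node], true, st.2.2.insert node days)
      else st) (conquer, false, m)

-- A's recursion; only node_iter (mutated in place by Python) propagates out of the recursive
-- call, so the recursion returns the final node_iter.  The fuel guard only makes the same
-- computation total: g.keys.length + 1 levels always suffice, since every recursive call is
-- made with at least one more graph key added to the conquered list.
def popAux (g : PySem.Dict Int (List Int)) :
    Nat → List Int → Int → PySem.Dict Int Int → PySem.Dict Int Int
  | 0, _, _, m => m
  | fuel+1, conquer, days, m =>
    let st := popStep g conquer (days + 1) m
    if st.2.1 then popAux g fuel st.1 (days + 1) st.2.2 else st.2.2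

def pop_nodes2 (graph : List (Int × List Int)) (conquer_cities : List Int) (days : Int)
    (node_iter : List (Int × Int)) : List Int × Int × (List (Int × Int)) :=
  let g := PySem.Dict.ofList graph
  let m := PySem.Dict.ofList node_iter
  (conquer_cities, days + 1, (popAux g (g.keys.length + 1) conquer_cities days m).items)

-- ===== PORT B =====
-- reverse index: rev[v] = every key w with v in graph[w], once per occurrence
def altRev (g : PySem.Dict Int (List Int)) : PySem.Dict Int (List Int) :=
  g.items.foldl (fun rev p =>
    p.2.foldl (fun rev v => rev.modify v [] (· ++ [p.1])) rev) PySem.Dict.empty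

-- initial residual degrees: deg[w] = occurrences in graph[w] outside the removed set
def altDeg (g : PySem.Dict Int (List Int)) (removed : PySem.Set Int) : PySem.Dict Int Int :=
  g.items.foldl (fun deg p =>
    deg.insert p.1 (p.2.foldl (fun d v => if !(PySem.Set.contains removed v) then d + 1 else d) 0))
    PySem.Dict.empty

-- the while loop; fuel guard as in popAux (one round per fuel unit, same bound)
def altLoop (g : PySem.Dict Int (List Int)) (rev : PySem.Dict Int (List Int)) :
    Nat → PySem.Set Int → PySem.Dict Int Int → Int → PySem.Dict Int Int → PySem.Dict Int Int
  | 0, _, _, _, m => m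
  | fuel+1, removed, deg, day, m =>
    let day := day + 1
    let layer := g.keys.filter (fun w => !(PySem.Set.contains removed w) && decide (deg.getD w 0 ≤ 1))
    if layer = [] then m
    else
      let p := layer.foldl (fun p w => (p.1.insert w day, PySem.Set.add p.2 w)) (m, removed)
      let deg := layer.foldl (fun dg v =>
        (rev.getD v []).foldl (fun dg w => dg.modify w 0 (· - 1)) dg) deg
      altLoop g rev fuel p.2 deg day p.1

def pop_nodes2_alt (graph : List (Int × List Int)) (conquer_cities : List Int) (days : Int)
    (node_iter : List (Int × Int)) : List Int × Int × (List (Int × Int)) :=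
  let g := PySem.Dict.ofList graph
  let m := PySem.Dict.ofList node_iter
  let removed := PySem.Set.ofList conquer_cities
  (conquer_cities, days + 1,
    (altLoop g (altRev g) (g.keys.length + 1) removed (altDeg g removed) days m).items)

-- ===== PRECONDITION & SPEC =====
def Spec_pop_nodes2 (graph : List (Int × List Int)) (conquer_cities : List Int) (days : Int) (node_iter : List (Int × Int)) (out : List Int × Int × (List (Int × Int))) : Prop := out = pop_nodes2_alt graph conquer_cities days node_iter
instance (graph : List (Int × List Int)) (conquer_cities : List Int) (days : Int) (node_iter : List (Int × Int)) (out : List Int × Int × (List (Int × Int))) : Decidable (Spec_pop_nodes2 graph conquer_cities days node_iter out) := by unfold Spec_pop_nodes2; infer_instance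

-- ===== CLAIM (what is proved, stated in full; the proofs are below) =====
def Claim_equal_pop_nodes2 : Prop := ∀ (graph : List (Int × List Int)) (conquer_cities : List Int) (days : Int) (node_iter : List (Int × Int)), Dom_pop_nodes2 graph conquer_cities days node_iter → Spec_pop_nodes2 graph conquer_cities days node_iter (pop_nodes2 graph conquer_cities days node_iter)

-- ===== LEMMAS AND PROOFS =====

-- A's per-round qualification test, as the filter predicate its loop computes
def predA (g : PySem.Dict Int (List Int)) (c : List Int) (w : Int) : Bool :=
  decide (w ∉ c ∧ (((g.getD w []).filter (fun nd => decide (nd ∉ c))).length ≤ 1 ∨ g.getD w [] = []))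

-- the invariant tying A's conquered list to B's removed set and degree table
def LoopInv (g : PySem.Dict Int (List Int)) (c : List Int) (S : PySem.Set Int)
    (deg : PySem.Dict Int Int) : Prop :=
  (∀ x : Int, x ∈ c ↔ PySem.Set.contains S x = true) ∧
  (∀ k ∈ g.keys, deg.getD k 0 = (((g.getD k []).filter (fun nd => decide (nd ∉ c))).length : Int))

theorem popStep_fold (g : PySem.Dict Int (List Int)) (c : List Int) (days : Int)
    (ks : List Int) : ∀ (ndl0 : List Int) (flag0 : Bool) (m0 : PySem.Dict Int Int),
    ks.foldl (fun st node =>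
      if node ∈ c then st
      else
        let adjacents := (g.getD node []).filter (fun nd => decide (nd ∉ c))
        if adjacents.length ≤ 1 ∨ g.getD node [] = [] then
          (st.1 ++ [node], true, st.2.2.insert node days)
        else st) (ndl0, flag0, m0)
    = (ndl0 ++ ks.filter (predA g c), flag0 || !(ks.filter (predA g c)).isEmpty,
       (ks.filter (predA g c)).foldl (fun m w => m.insert w days) m0) := by
  induction ks with
  | nil => simp
  | cons k ks ih =>
    intro ndl0 flag0 m0
    by_cases hk : k ∈ c
    · have hp : predA g c k = false := by simp [predA, hk]
      simp only [List.foldl_cons]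
      rw [if_pos hk, ih]
      simp [hp]
    · by_cases hcond : ((g.getD k []).filter (fun nd => decide (nd ∉ c))).length ≤ 1 ∨ g.getD k [] = []
      · have hp : predA g c k = true := by simp [predA, hk]; simpa using hcond
        simp only [List.foldl_cons]
        rw [if_neg hk]
        show (List.foldl _ (if ((g.getD k []).filter (fun nd => decide (nd ∉ c))).length ≤ 1 ∨ g.getD k [] = [] then (ndl0 ++ [k], true, m0.insert k days) else (ndl0, flag0, m0)) ks) = _
        rw [if_pos hcond, ih]
        simp [hp, List.append_assoc]
      · have hp : predA g c k = false := by simp [predA]; intro _; simpa using hcond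
        simp only [List.foldl_cons]
        rw [if_neg hk]
        show (List.foldl _ (if ((g.getD k []).filter (fun nd => decide (nd ∉ c))).length ≤ 1 ∨ g.getD k [] = [] then (ndl0 ++ [k], true, m0.insert k days) else (ndl0, flag0, m0)) ks) = _
        rw [if_neg hcond, ih]
        simp [hp]

theorem popStep_eq (g : PySem.Dict Int (List Int)) (c : List Int) (days : Int)
    (m : PySem.Dict Int Int) :
    popStep g c days m
    = (c ++ g.keys.filter (predA g c), !(g.keys.filter (predA g c)).isEmpty,
       (g.keys.filter (predA g c)).foldl (fun m w => m.insert w days) m) := by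
  unfold popStep
  rw [popStep_fold]
  simp

theorem dec_fold (xs : List Int) : ∀ (d : PySem.Dict Int Int) (k : Int),
    (xs.foldl (fun dg w => dg.modify w 0 (· - 1)) d).getD k 0 = d.getD k 0 - xs.count k := by
  induction xs with
  | nil => simp
  | cons x xs ih =>
    intro d k
    simp only [List.foldl_cons, ih, PySem.Dict.getD_modify, List.count_cons]
    by_cases h : k = x
    · simp [h]; ring
    · simp [h, Ne.symm h]

theorem foldl_insert_not_mem {α : Type} (f : Int × α → Int) (dflt : Int) (items : List (Int × α)) :
    ∀ (d : PySem.Dict Int Int) (k : Int), k ∉ items.map Prod.fst →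
    (items.foldl (fun dg p => dg.insert p.1 (f p)) d).getD k dflt = d.getD k dflt := by
  induction items with
  | nil => simp
  | cons p items ih =>
    intro d k hk
    simp only [List.map_cons, List.mem_cons] at hk
    push Not at hk
    simp only [List.foldl_cons, ih _ _ hk.2, PySem.Dict.getD_insert, if_neg hk.1]

theorem foldl_insert_mem {α : Type} (f : Int × α → Int) (dflt : Int) (items : List (Int × α)) :
    ∀ (d : PySem.Dict Int Int) (k : Int) (a : α), (items.map Prod.fst).Nodup → (k, a) ∈ items →
    (items.foldl (fun dg p => dg.insert p.1 (f p)) d).getD k dflt = f (k, a) := by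
  induction items with
  | nil => simp
  | cons p items ih =>
    intro d k a hnd hmem
    simp only [List.map_cons, List.nodup_cons] at hnd
    rcases List.mem_cons.mp hmem with h | h
    · subst h
      simp only [List.foldl_cons]
      rw [foldl_insert_not_mem f dflt items _ k hnd.1]
      simp
    · simp only [List.foldl_cons]
      exact ih _ k a hnd.2 h

theorem rev_flat (items : List (Int × List Int)) : ∀ d : PySem.Dict Int (List Int),
    items.foldl (fun rev p => p.2.foldl (fun rev v => rev.modify v [] (· ++ [p.1])) rev) d
    = (items.flatMap (fun p => p.2.map (fun v => (v, p.1)))).foldl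
        (fun dg q => dg.modify q.1 [] (· ++ [q.2])) d := by
  induction items with
  | nil => simp
  | cons p items ih =>
    intro d
    simp only [List.foldl_cons, List.flatMap_cons, List.foldl_append, List.foldl_map]
    rw [ih]

theorem head_cnt (adj : List Int) (w v k : Int) :
    (((adj.map (fun x => (x, w))).filter (fun q => q.1 == v)).map (fun q => q.2)).count k
    = if w = k then adj.count v else 0 := by
  induction adj with
  | nil => simp
  | cons x adj ih =>
    simp only [List.map_cons, List.filter_cons]
    by_cases hx : x = v
    · simp only [hx, beq_self_eq_true, if_pos]
      simp only [List.map_cons, List.count_cons, ih, List.count_cons]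
      by_cases hw : w = k <;> simp [hw]
    · have : ((x, w).1 == v) = false := by simpa using hx
      simp only [this, Bool.false_eq_true, if_false, ih, List.count_cons]
      simp

theorem count_edges_zero (items : List (Int × List Int)) : ∀ v k : Int, k ∉ items.map Prod.fst →
    ((((items.flatMap (fun p => p.2.map (fun v => (v, p.1)))).filter (fun q => q.1 == v)).map
      (fun q => q.2)).count k) = 0 := by
  induction items with
  | nil => simp
  | cons p items ih =>
    intro v k hk
    simp only [List.map_cons, List.mem_cons] at hk
    push Not at hk
    simp only [List.flatMap_cons, List.filter_append, List.map_append, List.count_append,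
      head_cnt, ih v k hk.2]
    rw [if_neg (fun h : p.1 = k => hk.1 h.symm)]

theorem count_edges (items : List (Int × List Int)) : ∀ (v k : Int) (adjk : List Int),
    (items.map Prod.fst).Nodup → (k, adjk) ∈ items →
    ((((items.flatMap (fun p => p.2.map (fun v => (v, p.1)))).filter (fun q => q.1 == v)).map
      (fun q => q.2)).count k) = adjk.count v := by
  induction items with
  | nil => simp
  | cons p items ih =>
    intro v k adjk hnd hmem
    simp only [List.map_cons, List.nodup_cons] at hnd
    simp only [List.flatMap_cons, List.filter_append, List.map_append, List.count_append, head_cnt]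
    rcases List.mem_cons.mp hmem with h | h
    · subst h
      rw [if_pos rfl, count_edges_zero items v k hnd.1]
      simp
    · have hne : p.1 ≠ k := by
        intro he; exact hnd.1 (he ▸ (List.mem_map.mpr ⟨(k, adjk), h, rfl⟩))
      simp only [if_neg hne, ih v k adjk hnd.2 h, Nat.zero_add]

theorem countP_snoc (adj : List Int) (c : List Int) (v : Int) (hv : v ∉ c) :
    adj.countP (fun x => decide (x ∉ c))
    = adj.countP (fun x => decide (x ∉ c ++ [v])) + adj.count v := by
  induction adj with
  | nil => simp
  | cons x adj ih =>
    simp only [List.countP_cons, List.count_cons, ih]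
    by_cases hx : x = v
    · subst hx
      simp [hv]
      omega
    · simp only [List.mem_append, List.mem_singleton, hx]
      by_cases hc : x ∈ c <;> simp [hc, hx] <;> omega

theorem countP_peel (L : List Int) : ∀ (c : List Int), L.Nodup → (∀ v ∈ L, v ∉ c) →
    ∀ adj : List Int, adj.countP (fun x => decide (x ∉ c))
    = adj.countP (fun x => decide (x ∉ c ++ L)) + (L.map (fun v => adj.count v)).sum := by
  induction L with
  | nil => simp
  | cons v L ih =>
    intro c hnd hdis adj
    simp only [List.nodup_cons] at hnd
    rw [countP_snoc adj c v (hdis v (List.mem_cons_self))]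
    have hdis' : ∀ w ∈ L, w ∉ c ++ [v] := by
      intro w hw
      simp only [List.mem_append, List.mem_singleton]
      rintro (h | h)
      · exact hdis w (List.mem_cons_of_mem _ hw) h
      · exact hnd.1 (h ▸ hw)
    rw [ih (c ++ [v]) hnd.2 hdis' adj]
    simp only [List.append_assoc, List.singleton_append, List.map_cons, List.sum_cons]
    omega

theorem outer_dec (rev : PySem.Dict Int (List Int)) (L : List Int) :
    ∀ (deg : PySem.Dict Int Int) (k : Int),
    (L.foldl (fun dg v => (rev.getD v []).foldl (fun dg w => dg.modify w 0 (· - 1)) dg) deg).getD k 0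
    = deg.getD k 0 - ((L.map (fun v => ((rev.getD v []).count k : Int))).sum) := by
  induction L with
  | nil => simp
  | cons v L ih =>
    intro deg k
    simp only [List.foldl_cons, ih, List.map_cons, List.sum_cons, dec_fold]
    omega

-- the value of the reverse index at a graph key
theorem altRev_count (g : PySem.Dict Int (List Int)) (hnd : g.keys.Nodup)
    (k : Int) (hk : k ∈ g.keys) (v : Int) :
    ((altRev g).getD v []).count k = (g.getD k []).count v := by
  obtain ⟨⟨k', adjk⟩, hmem, hfst⟩ := List.mem_map.mp hk
  cases hfst
  unfold altRev
  rw [rev_flat, PySem.Dict.getD_foldl_modify_append]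
  simp only [PySem.Dict.getD_empty, List.nil_append]
  rw [count_edges g.items v k' adjk hnd hmem]
  rw [PySem.Dict.getD_of_mem_items g hmem hnd]

theorem altDeg_getD (g : PySem.Dict Int (List Int)) (S : PySem.Set Int) (hnd : g.keys.Nodup)
    (k : Int) (hk : k ∈ g.keys) :
    (altDeg g S).getD k 0
    = ((g.getD k []).countP (fun v => !(PySem.Set.contains S v)) : Int) := by
  obtain ⟨⟨k', adjk⟩, hmem, hfst⟩ := List.mem_map.mp hk
  cases hfst
  unfold altDeg
  rw [foldl_insert_mem (fun p => p.2.foldl (fun d v => if !(PySem.Set.contains S v) then d + 1 else d) 0) 0 g.items _ k' adjk hnd hmem]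
  rw [PySem.Dict.getD_of_mem_items g hmem hnd]
  rw [PySem.List.foldl_if_add_one]
  simp

-- one round: A's layer equals B's layer
theorem layer_congr (g : PySem.Dict Int (List Int)) (c : List Int) (S : PySem.Set Int)
    (deg : PySem.Dict Int Int) (hinv : LoopInv g c S deg) :
    g.keys.filter (predA g c)
    = g.keys.filter (fun w => !(PySem.Set.contains S w) && decide (deg.getD w 0 ≤ 1)) := by
  apply List.filter_congr
  intro w hw
  have h2 := hinv.2 w hw
  by_cases hc : w ∈ c
  · have hS : PySem.Set.contains S w = true := (hinv.1 w).mp hc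
    have hA : predA g c w = false := decide_eq_false (fun h => h.1 hc)
    rw [hA, hS]
    simp
  · have hS : PySem.Set.contains S w = false := by
      cases h : PySem.Set.contains S w
      · rfl
      · exact absurd ((hinv.1 w).mpr h) hc
    have hiff : (deg.getD w 0 ≤ 1)
        ↔ (((g.getD w []).filter (fun nd => decide (nd ∉ c))).length ≤ 1 ∨ g.getD w [] = []) := by
      rw [h2]
      constructor
      · intro h
        left
        exact_mod_cast h
      · rintro (h | h)
        · exact_mod_cast h
        · simp [h]
    by_cases hd : deg.getD w 0 ≤ 1
    · have hA : predA g c w = true := decide_eq_true ⟨hc, hiff.mp hd⟩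
      rw [hA, hS]
      simp [hd]
    · have hA : predA g c w = false := decide_eq_false (fun h => hd (hiff.mpr h.2))
      rw [hA, hS]
      simp [hd]

theorem main_lemma (g : PySem.Dict Int (List Int)) (hnd : g.keys.Nodup) (fuel : Nat) :
    ∀ (c : List Int) (S : PySem.Set Int) (deg : PySem.Dict Int Int) (days : Int)
      (m : PySem.Dict Int Int), LoopInv g c S deg →
      popAux g fuel c days m = altLoop g (altRev g) fuel S deg days m := by
  induction fuel with
  | zero => intro c S deg days m _; rfl
  | succ fuel ih =>
    intro c S deg days m hinv
    show (let st := popStep g c (days + 1) m;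
          if st.2.1 then popAux g fuel st.1 (days + 1) st.2.2 else st.2.2) = _
    rw [popStep_eq]
    have hlayer := layer_congr g c S deg hinv
    set L := g.keys.filter (predA g c) with hL
    show (if (!L.isEmpty) = true then
            popAux g fuel (c ++ L) (days + 1) (L.foldl (fun m w => m.insert w (days + 1)) m)
          else L.foldl (fun m w => m.insert w (days + 1)) m) = _
    show _ = (let day := days + 1;
      let layer := g.keys.filter (fun w => !(PySem.Set.contains S w) && decide (deg.getD w 0 ≤ 1));
      if layer = [] then m
      else
        let p := layer.foldl (fun p w => (p.1.insert w day, PySem.Set.add p.2 w)) (m, S)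
        let deg := layer.foldl (fun dg v =>
          ((altRev g).getD v []).foldl (fun dg w => dg.modify w 0 (· - 1)) dg) deg
        altLoop g (altRev g) fuel p.2 deg day p.1)
    simp only [← hlayer]
    by_cases hemp : L = []
    · simp [hemp]
    · rw [if_neg hemp]
      rw [if_pos (show (!L.isEmpty) = true by simp [hemp])]
      rw [PySem.List.foldl_prod_mk (f := fun m w => PySem.Dict.insert m w (days + 1))
            (g := fun s w => PySem.Set.add s w)]
      -- facts about the layer L
      have hLnd : L.Nodup := List.Nodup.filter _ hnd
      have hLsub : ∀ v ∈ L, v ∈ g.keys := fun v hv => List.mem_of_mem_filter hv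
      have hLnotc : ∀ v ∈ L, v ∉ c := by
        intro v hv
        have := List.of_mem_filter hv
        simp only [predA, decide_eq_true_eq] at this
        exact this.1
      apply ih
      constructor
      · intro x
        have hupd : L.foldl (fun s w => PySem.Set.add s w) S = PySem.Set.update S L := rfl
        rw [hupd, PySem.Set.contains_iff, PySem.Set.mem_update, List.mem_append]
        have h1 := hinv.1 x
        rw [PySem.Set.contains_iff] at h1
        exact or_congr h1 Iff.rfl
      · intro k hk
        rw [outer_dec, hinv.2 k hk]
        have hrc : ∀ v ∈ L, ((altRev g).getD v []).count k = (g.getD k []).count v := by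
          intro v _
          exact altRev_count g hnd k hk v
        rw [List.map_congr_left (fun v hv => by rw [hrc v hv])]
        have hpeel := countP_peel L c hLnd hLnotc (g.getD k [])
        simp only [List.countP_eq_length_filter] at hpeel
        have hcast : (((g.getD k []).filter (fun nd => decide (nd ∉ c))).length : Int)
            = (((g.getD k []).filter (fun nd => decide (nd ∉ c ++ L))).length : Int)
              + ((L.map (fun v => (g.getD k []).count v)).sum : Int) := by
          exact_mod_cast hpeel
        rw [hcast]
        have hsum : ((L.map (fun v => (g.getD k []).count v)).sum : Int)
            = (L.map (fun v => ((g.getD k []).count v : Int))).sum := by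
          simp
          rfl
        rw [hsum]
        ring

-- ===== VERDICT (by name: the statement is the Claim_ definition above) =====
theorem pop_nodes2_spec : Claim_equal_pop_nodes2 := by
  intro graph conquer_cities days node_iter _
  unfold Spec_pop_nodes2 pop_nodes2 pop_nodes2_alt
  simp only []
  have hnd : (PySem.Dict.ofList graph).keys.Nodup := PySem.Dict.nodup_keys_ofList graph
  rw [main_lemma (PySem.Dict.ofList graph) hnd _ conquer_cities
      (PySem.Set.ofList conquer_cities)
      (altDeg (PySem.Dict.ofList graph) (PySem.Set.ofList conquer_cities)) days
      (PySem.Dict.ofList node_iter)]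
  constructor
  · intro x
    exact ((PySem.Set.contains_iff _ _).trans (PySem.Set.mem_ofList _ _)).symm
  · intro k hk
    rw [altDeg_getD _ _ hnd k hk]
    rw [List.countP_eq_length_filter]
    norm_cast
    congr 1
    apply List.filter_congr
    intro v _
    by_cases hv : v ∈ conquer_cities
    · have hc : PySem.Set.contains (PySem.Set.ofList conquer_cities) v = true :=
        (PySem.Set.contains_iff _ _).mpr ((PySem.Set.mem_ofList _ _).mpr hv)
      simp [hv]
    · have hc : PySem.Set.contains (PySem.Set.ofList conquer_cities) v = false := by
        cases h : PySem.Set.contains (PySem.Set.ofList conquer_cities) v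
        · rfl
        · exact absurd ((PySem.Set.mem_ofList _ _).mp ((PySem.Set.contains_iff _ _).mp h)) hv
      simp [hv]
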